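-- pv_equiv track=rewrite | github.com/kevinnbass/TestMaster | archive/20250822_182300_UTC_unified_api_gateway_consolidation/unified_api_gateway.py | _path_matches_pattern
-- ===== SOURCE A (Python) =====
-- def _path_matches_pattern(request_path: str, endpoint_path: str) -> bool:
--     """Check if request path matches endpoint pattern"""
--     request_parts = request_path.strip('/').split('/')
--     endpoint_parts = endpoint_path.strip('/').split('/')
--
--     if len(request_parts) != len(endpoint_parts):
--         return False
--
--     for req_part, ep_part in zip(request_parts, endpoint_parts):
--         if ep_part.startswith('{') and ep_part.endswith('}'):
--             # Path parameter - matches any value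
--             continue
--         elif req_part != ep_part:
--             return False
--
--     return True
-- ===== SOURCE B (Python) =====
-- def _path_matches_pattern(request_path: str, endpoint_path: str) -> bool:
--     """Check if request path matches endpoint pattern (recursive segment-pair descent)."""
--     def go(rq, ep):
--         if not rq and not ep:
--             return True
--         if not rq or not ep:
--             return False
--         e = ep[0]
--         ok = (e.startswith('{') and e.endswith('}')) or rq[0] == e
--         return ok and go(rq[1:], ep[1:])
--     return go(request_path.strip('/').split('/'), endpoint_path.strip('/').split('/'))
-- ===== Notes on version B (the rewrite author's own statement) =====
-- stated objective: alternative
-- what changed: Replaces A's length check plus imperative zip loop with early returns by a single structural recursion over both segment lists at once, where unequal lengths fall out of the base cases and matching is a short-circuit conjunction.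
import Mathlib
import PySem

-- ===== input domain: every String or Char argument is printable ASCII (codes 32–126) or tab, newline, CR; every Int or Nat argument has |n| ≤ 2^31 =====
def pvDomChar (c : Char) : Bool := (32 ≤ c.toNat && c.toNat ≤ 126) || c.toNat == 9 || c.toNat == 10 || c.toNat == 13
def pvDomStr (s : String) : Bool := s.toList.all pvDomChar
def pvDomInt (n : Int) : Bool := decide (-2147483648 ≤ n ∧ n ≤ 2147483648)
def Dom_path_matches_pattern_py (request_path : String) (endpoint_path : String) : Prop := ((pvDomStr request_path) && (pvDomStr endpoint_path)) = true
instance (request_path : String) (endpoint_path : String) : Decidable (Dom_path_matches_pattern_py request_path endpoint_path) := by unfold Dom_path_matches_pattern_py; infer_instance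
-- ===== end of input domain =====

-- B replaces A's length check + zip loop with early returns by one structural
-- recursion over both segment lists (alternative decomposition, same cost).

-- ===== PORT A =====
-- the for-loop over zip(request_parts, endpoint_parts) with early return False
def pvLoopA : List (String × String) → Bool
  | [] => true
  | (r, e) :: rest =>
    if PySem.Str.startswith e "{" && PySem.Str.endswith e "}" then pvLoopA rest
    else if r != e then false
    else pvLoopA rest

def path_matches_pattern_py (request_path : String) (endpoint_path : String) : Bool :=
  let request_parts := ((PySem.Str.split? (PySem.Str.stripChars request_path "/") "/").getD [])
  let endpoint_parts := ((PySem.Str.split? (PySem.Str.stripChars endpoint_path "/") "/").getD [])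
  if request_parts.length ≠ endpoint_parts.length then false
  else pvLoopA (request_parts.zip endpoint_parts)

-- ===== PORT B =====
-- Source B's recursive helper go(rq, ep)
def pvGoB : List String → List String → Bool
  | [], [] => true
  | [], _ :: _ => false
  | _ :: _, [] => false
  | r :: rs, e :: es =>
    ((PySem.Str.startswith e "{" && PySem.Str.endswith e "}") || r == e) && pvGoB rs es

def path_matches_pattern_py_alt (request_path : String) (endpoint_path : String) : Bool :=
  pvGoB (((PySem.Str.split? (PySem.Str.stripChars request_path "/") "/").getD []))
        (((PySem.Str.split? (PySem.Str.stripChars endpoint_path "/") "/").getD []))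

-- ===== PRECONDITION & SPEC =====
def Spec_path_matches_pattern_py (request_path : String) (endpoint_path : String) (out : Bool) : Prop := out = path_matches_pattern_py_alt request_path endpoint_path
instance (request_path : String) (endpoint_path : String) (out : Bool) : Decidable (Spec_path_matches_pattern_py request_path endpoint_path out) := by unfold Spec_path_matches_pattern_py; infer_instance

-- ===== CLAIM (what is proved, stated in full; the proofs are below) =====
def Claim_equal_path_matches_pattern_py : Prop := ∀ (request_path : String) (endpoint_path : String), Dom_path_matches_pattern_py request_path endpoint_path → Spec_path_matches_pattern_py request_path endpoint_path (path_matches_pattern_py request_path endpoint_path)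

-- ===== LEMMAS AND PROOFS =====

-- ===== VERDICT (by name: the statement is the Claim_ definition above) =====
lemma pvGoB_eq (rq ep : List String) :
    (if rq.length ≠ ep.length then false else pvLoopA (rq.zip ep)) = pvGoB rq ep := by
  induction rq generalizing ep with
  | nil => cases ep <;> simp [pvLoopA, pvGoB]
  | cons r rs ih =>
    cases ep with
    | nil => simp [pvGoB]
    | cons e es =>
      by_cases hlen : rs.length = es.length
      · have h2 : pvLoopA (rs.zip es) = pvGoB rs es := by
          have h := ih es; rwa [if_neg (by simp [hlen])] at h
        simp only [List.length_cons, ne_eq, hlen, not_true_eq_false, if_false,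
          List.zip_cons_cons, pvLoopA, pvGoB]
        by_cases hp : PySem.Chars.startswith e.toList ['{'] = true
          ∧ PySem.Chars.endswith e.toList ['}'] = true
        · obtain ⟨h1a, h1b⟩ := hp
          simp [h1a, h1b, h2]
        · have hab : (PySem.Chars.startswith e.toList ['{']
              && PySem.Chars.endswith e.toList ['}']) = false := by
            cases hs : PySem.Chars.startswith e.toList ['{'] <;>
              cases he : PySem.Chars.endswith e.toList ['}'] <;> simp_all
          by_cases hre : r = e
          · simp [hp, hab, hre, h2]
          · simp [hp, hab, hre, bne_iff_ne]
      · have h2 : pvGoB rs es = false := by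
          rw [← ih es, if_pos (by simpa using hlen)]
        rw [if_pos (by simp [hlen])]
        simp [pvGoB, h2]

theorem path_matches_pattern_py_spec : Claim_equal_path_matches_pattern_py := by
  intro rp ep _
  unfold Spec_path_matches_pattern_py path_matches_pattern_py path_matches_pattern_py_alt
  exact pvGoB_eq _ _
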